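-- pv_equiv track=rewrite | github.com/faurej/m13 | recnref_m13/functions.py | count_homopolymer
-- ===== SOURCE A (Python) =====
-- def count_homopolymer(seq,length):
--     """
--     Count number of occurences of homopolymer of specified length in a given sequence
--
--     Parameters:
--         -seq (str) : sequence of DNA (ex:'ATGTTTTTTTTTTTTTTTTTAG')
--         -length (int): homopolymer length to be searched (ex: 7)
--
--     Returns:
--         -count (int): number of occurences of homopolymer of specified length in a given sequence
--
--     """
--     count = 0
--     for i in range(len(seq)-length+1):
--         sub_seq = seq[i:i+length]
--         sub_seq_uniq = set(sub_seq)
--         if len(sub_seq_uniq) == 1: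
--             count += 1
--     return count
-- ===== SOURCE B (Python) =====
-- def count_homopolymer(seq, length):
--     # One pass over runs of equal characters: a run of r equal characters
--     # contains max(0, r - length + 1) homopolymer windows of the given length.
--     if length <= 0:
--         return 0
--     count = 0
--     run = 0
--     prev = None
--     for ch in seq:
--         if ch == prev:
--             run += 1
--         else:
--             if run >= length:
--                 count += run - length + 1
--             prev = ch
--             run = 1
--     if run >= length:
--         count += run - length + 1
--     return count
-- ===== Notes on version B (the rewrite author's own statement) =====
-- stated objective: faster
-- what changed: Replaced the scan over all length-sized windows (building a set from each slice) by a single pass over runs of equal characters, adding max(0, run - length + 1) per run.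
-- intended difference: For negative length, Python's slice stop i+length wraps to the end of the string and A counts accidental all-equal windows of size len(seq)+length (A('AA',-1)=1); B returns 0 there, the intended count since no homopolymer of negative length exists. — e.g. on count_homopolymer("AA", -1): A returns 1, B returns 0
import Mathlib
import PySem

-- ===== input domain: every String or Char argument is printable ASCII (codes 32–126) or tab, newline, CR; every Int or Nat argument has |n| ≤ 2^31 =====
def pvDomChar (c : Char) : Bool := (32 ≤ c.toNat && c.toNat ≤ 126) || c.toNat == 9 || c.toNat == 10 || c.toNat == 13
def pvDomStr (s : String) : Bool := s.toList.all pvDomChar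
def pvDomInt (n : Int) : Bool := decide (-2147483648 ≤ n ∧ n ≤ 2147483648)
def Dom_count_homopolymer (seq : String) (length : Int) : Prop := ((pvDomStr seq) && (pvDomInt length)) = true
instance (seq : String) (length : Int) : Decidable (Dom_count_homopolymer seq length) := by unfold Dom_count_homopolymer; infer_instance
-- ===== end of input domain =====

-- B replaces A's scan over all length-sized windows (building a set per window) by a single pass
-- over runs of equal characters, adding max(0, run - length + 1) per run; for negative `length`
-- B returns 0 where A counts accidental wrapped-slice windows (see D_ below).


-- ===== PORT A =====
def count_homopolymer (seq : String) (length : Int) : Int :=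
  (PySem.List.pyRange 0 (PySem.Str.len seq - length + 1) 1).foldl
    (fun count i =>
      if PySem.Set.len (PySem.Set.ofList
            (PySem.Str.slice seq (some i) (some (i + length))).toList) = 1
      then count + 1 else count) 0

-- ===== PORT B =====
-- loop body of B: state = (count, run, prev)
def homopolyStep (length : Int) (s : Int × Int × Option Char) (ch : Char) :
    Int × Int × Option Char :=
  if some ch = s.2.2 then (s.1, s.2.1 + 1, s.2.2)
  else (if length ≤ s.2.1 then s.1 + s.2.1 - length + 1 else s.1, 1, some ch)

def count_homopolymer_alt (seq : String) (length : Int) : Int :=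
  if length ≤ 0 then 0
  else
    let st := seq.toList.foldl (homopolyStep length) (0, 0, none)
    if length ≤ st.2.1 then st.1 + st.2.1 - length + 1 else st.1

-- ===== PRECONDITION & SPEC =====
-- `true` iff the list is nonempty and all its characters are equal (used by D_ and the proofs)
def allSameB : List Char → Bool
  | [] => false
  | c :: t => t.all (fun d => d == c)

-- For negative `length`, Python's slice stop `i+length` is negative and wraps to the end of the
-- string, so A counts accidental all-equal windows of size len(seq)+length (e.g. A("AA",-1)=1);
-- B returns 0 there, the intended count since no homopolymer of negative length exists.
def D_count_homopolymer (seq : String) (length : Int) : Prop :=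
  length < 0 ∧
    (List.range (min (-length).toNat seq.toList.length)).any
      (fun i => allSameB ((seq.toList.drop i).take ((seq.toList.length : Int) + length).toNat)) = true
instance (seq : String) (length : Int) : Decidable (D_count_homopolymer seq length) := by
  unfold D_count_homopolymer; infer_instance

def Spec_count_homopolymer (seq : String) (length : Int) (out : Int) : Prop :=
  ¬ D_count_homopolymer seq length → out = count_homopolymer_alt seq length
instance (seq : String) (length : Int) (out : Int) : Decidable (Spec_count_homopolymer seq length out) := by
  unfold Spec_count_homopolymer; infer_instance

def pvDiffWitness_count_homopolymer : String × Int := ("AA", -1)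
def pvDiffWitnessOut_count_homopolymer : Int × Int := (1, 0)

-- ===== CLAIM (what is proved, stated in full; the proofs are below) =====
def Claim_unchanged_count_homopolymer : Prop := ∀ (seq : String) (length : Int), Dom_count_homopolymer seq length → Spec_count_homopolymer seq length (count_homopolymer seq length)
def Claim_changed_count_homopolymer : Prop := Dom_count_homopolymer (pvDiffWitness_count_homopolymer.1) (pvDiffWitness_count_homopolymer.2) ∧ D_count_homopolymer (pvDiffWitness_count_homopolymer.1) (pvDiffWitness_count_homopolymer.2) ∧ count_homopolymer (pvDiffWitness_count_homopolymer.1) (pvDiffWitness_count_homopolymer.2) = pvDiffWitnessOut_count_homopolymer.1 ∧ count_homopolymer_alt (pvDiffWitness_count_homopolymer.1) (pvDiffWitness_count_homopolymer.2) = pvDiffWitnessOut_count_homopolymer.2 ∧ pvDiffWitnessOut_count_homopolymer.1 ≠ pvDiffWitnessOut_count_homopolymer.2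
def Claim_exact_count_homopolymer : Prop := ∀ (seq : String) (length : Int), Dom_count_homopolymer seq length → D_count_homopolymer seq length → count_homopolymer seq length ≠ count_homopolymer_alt seq length

-- ===== LEMMAS AND PROOFS =====

-- A's counting loop is a countP over its range
theorem foldl_ite_count (P : Int → Prop) [DecidablePred P] :
    ∀ (xs : List Int) (a : Int),
      xs.foldl (fun c i => if P i then c + 1 else c) a = a + ((xs.countP fun i => decide (P i)) : Int) := by
  intro xs
  induction xs with
  | nil => intro a; simp
  | cons x xs ih =>
    intro a
    by_cases h : P x <;> simp [ih, h] <;> push_cast <;> ring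

theorem A_char (seq : String) (length : Int) :
    count_homopolymer seq length =
      ((PySem.List.pyRange 0 (PySem.Str.len seq - length + 1) 1).countP
        (fun i => decide (PySem.Set.len (PySem.Set.ofList
          (PySem.Str.slice seq (some i) (some (i + length))).toList) = 1)) : Int) := by
  unfold count_homopolymer
  rw [foldl_ite_count (fun i => PySem.Set.len (PySem.Set.ofList
      (PySem.Str.slice seq (some i) (some (i + length))).toList) = 1)]
  simp

-- a one-element character set means a nonempty all-equal list
theorem setlen_one_iff (w : List Char) :
    PySem.Set.len (PySem.Set.ofList w) = 1 ↔ allSameB w = true := by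
  cases w with
  | nil => simp [PySem.Set.len, allSameB, PySem.Set.ofList]
  | cons c t =>
    rw [PySem.Set.ofList_cons]
    simp only [PySem.Set.len, allSameB, List.length_cons]
    constructor
    · intro h
      have hlen : ((PySem.Set.ofList t).discard c).length = 0 := by omega
      rw [List.length_eq_zero_iff] at hlen
      rw [List.all_eq_true]
      intro d hd
      by_contra hne
      have : d ∈ (PySem.Set.ofList t).discard c := by
        rw [PySem.Set.mem_discard]
        exact ⟨(PySem.Set.mem_ofList t d).2 hd, by simpa using hne⟩
      rw [hlen] at this; simp at this
    · intro h
      have : (PySem.Set.ofList t).discard c = [] := by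
        rw [List.eq_nil_iff_forall_not_mem]
        intro d hd
        rw [PySem.Set.mem_discard, PySem.Set.mem_ofList] at hd
        rw [List.all_eq_true] at h
        exact hd.2 (by simpa using h d hd.1)
      rw [this]; simp

theorem strslice_toList (seq : String) (a b : Option Int) :
    (PySem.Str.slice seq a b).toList = PySem.List.slice seq.toList a b := by
  simp [PySem.Str.slice, PySem.Chars.slice]

-- number of all-equal windows of size L
def winCount (L : Nat) (l : List Char) : Nat :=
  (List.range (l.length + 1 - L)).countP (fun k => allSameB ((l.drop k).take L))

theorem winCount_nil_of_lt (L : Nat) (l : List Char) (h : l.length < L) : winCount L l = 0 := by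
  unfold winCount
  have : l.length + 1 - L = 0 := by omega
  simp [this]

theorem winCount_cons (L : Nat) (c : Char) (t : List Char) (h : L ≤ t.length + 1) :
    winCount L (c :: t) =
      (if allSameB ((c :: t).take L) then 1 else 0) + winCount L t := by
  unfold winCount
  have h1 : (c :: t).length + 1 - L = (t.length + 1 - L) + 1 := by simp; omega
  rw [h1, List.range_succ_eq_map, List.countP_cons, List.countP_map]
  have h2 : List.countP ((fun k => allSameB (((c :: t).drop k).take L)) ∘ Nat.succ)
      (List.range (t.length + 1 - L)) = List.countP (fun k => allSameB ((t.drop k).take L))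
      (List.range (t.length + 1 - L)) := rfl
  rw [h2]
  simp only [List.drop_zero]
  exact Nat.add_comm _ _

theorem allSameB_replicate (L : Nat) (hL : 1 ≤ L) (c : Char) :
    allSameB (List.replicate L c) = true := by
  cases L with
  | zero => omega
  | succ L' => simp [List.replicate_succ, allSameB]

theorem winCount_rep (L : Nat) (hL : 1 ≤ L) (c : Char) :
    ∀ (m : Nat) (rest : List Char), rest.head? ≠ some c →
      winCount L (List.replicate m c ++ rest) = (m + 1 - L) + winCount L rest := by
  intro m
  induction m with
  | zero =>
    intro rest h
    have : (0 : Nat) + 1 - L = 0 := by omega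
    rw [this, List.replicate_zero, List.nil_append, Nat.zero_add]
  | succ m ih =>
    intro rest h
    have hlist : List.replicate (m + 1) c ++ rest = c :: (List.replicate m c ++ rest) := by
      simp [List.replicate_succ]
    rw [hlist]
    by_cases hlen : L ≤ (List.replicate m c ++ rest).length + 1
    · rw [winCount_cons L c _ hlen, ih rest h]
      by_cases hcase : L ≤ m + 1
      · have htake : (c :: (List.replicate m c ++ rest)).take L = List.replicate L c := by
          rw [← hlist, List.take_append, List.take_replicate]
          have h1 : min L (m + 1) = L := by omega
          have h2 : L - (List.replicate (m + 1) c).length = 0 := by simp; omega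
          rw [h1, h2]; simp
        rw [htake, allSameB_replicate L hL c, if_pos rfl]
        omega
      · cases rest with
        | nil =>
          exfalso; simp at hlen; omega
        | cons d t' =>
          have hd : d ≠ c := by simpa using h
          obtain ⟨L', hLe⟩ : ∃ L', L = L' + 1 := ⟨L - 1, by omega⟩
          have hL'm : m ≤ L' := by omega
          have htake : allSameB ((c :: (List.replicate m c ++ d :: t')).take L) = false := by
            rw [hLe, List.take_succ_cons]
            show (List.take L' (List.replicate m c ++ d :: t')).all (fun e => e == c) = false
            rw [List.all_eq_false]
            refine ⟨d, ?_, by simp [hd]⟩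
            rw [List.take_append, List.take_replicate]
            refine List.mem_append.2 (Or.inr ?_)
            have h3 : L' - (List.replicate m c).length = (L' - m - 1) + 1 := by simp; omega
            rw [h3, List.take_succ_cons]
            exact List.mem_cons_self
          rw [htake, if_neg (by simp)]
          omega
    · have hlen2 : (c :: (List.replicate m c ++ rest)).length < L := by simp at hlen ⊢; omega
      rw [winCount_nil_of_lt L _ hlen2, winCount_nil_of_lt L rest (by simp at hlen ⊢; omega)]
      simp at hlen
      omega

-- the Python slice seq[i:i+length], length ≤ 0, outside the wrap window is empty
theorem slice_out (l : List Char) (i len : Int) (hi : 0 ≤ i) (hl : len ≤ 0)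
    (hout : ¬ (i < min (-len) (l.length : Int))) :
    PySem.List.slice l (some i) (some (i + len)) = [] := by
  simp only [PySem.List.slice, PySem.List.clampIdx]
  have : PySem.List.clampIdx l.length (i + len) - PySem.List.clampIdx l.length i = 0 := by
    simp only [PySem.List.clampIdx]; split_ifs <;> omega
  simp only [PySem.List.clampIdx] at this
  rw [this]; simp

-- ... and inside the wrap window it is a window of size len(seq)+length
theorem slice_in (l : List Char) (i len : Int) (hi : 0 ≤ i) (hl : len < 0)
    (hin : i < min (-len) (l.length : Int)) :
    PySem.List.slice l (some i) (some (i + len)) =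
      (l.drop i.toNat).take ((l.length : Int) + len).toNat := by
  simp only [PySem.List.slice, PySem.List.clampIdx]
  have ha : (if i < 0 then if (l.length : Int) + i < 0 then 0 else ((l.length : Int) + i).toNat else min i.toNat l.length) = i.toNat := by
    split_ifs <;> omega
  have hb : (if i + len < 0 then if (l.length : Int) + (i + len) < 0 then 0 else ((l.length : Int) + (i + len)).toNat else min (i + len).toNat l.length) - i.toNat = ((l.length : Int) + len).toNat := by
    split_ifs <;> omega
  rw [ha, hb]

theorem A_eq_winCount (seq : String) (length : Int) (h : 1 ≤ length) :
    count_homopolymer seq length = (winCount length.toNat seq.toList : Int) := by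
  rw [A_char, PySem.List.pyRange_one, List.countP_map]
  unfold winCount
  congr 1
  have hM : (PySem.Str.len seq - length + 1 - 0).toNat = seq.toList.length + 1 - length.toNat := by
    rw [PySem.Str.len_eq]; omega
  rw [hM]
  apply List.countP_congr
  intro k _
  have harg : (0 : Int) + (k : Nat) = ((k : Nat) : Int) := by omega
  simp only [Function.comp, harg]
  have hlen : ((k : Nat) : Int) + length = ((k : Nat) : Int) + ((length.toNat : Nat) : Int) := by omega
  rw [strslice_toList, hlen, PySem.List.slice_natCast_add]
  simp only [decide_eq_true_eq]
  exact setlen_one_iff _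

def contrib (length r : Int) : Int := if length ≤ r then r - length + 1 else 0

theorem flush_eq (length c r : Int) :
    (if length ≤ r then c + r - length + 1 else c) = c + contrib length r := by
  unfold contrib; split_ifs <;> ring

def leadRun (c : Char) : List Char → Nat
  | [] => 0
  | d :: t => if d = c then leadRun c t + 1 else 0

theorem leadRun_decomp (c : Char) : ∀ (t : List Char),
    t = List.replicate (leadRun c t) c ++ t.drop (leadRun c t) ∧
      (t.drop (leadRun c t)).head? ≠ some c := by
  intro t
  induction t with
  | nil => simp [leadRun]
  | cons d t' ih =>
    by_cases hd : d = c
    · subst hd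
      have h1 : leadRun d (d :: t') = leadRun d t' + 1 := by simp [leadRun]
      rw [h1]
      refine ⟨?_, ?_⟩
      · rw [List.replicate_succ, List.cons_append, List.drop_succ_cons]
        exact congrArg (d :: ·) ih.1
      · rw [List.drop_succ_cons]; exact ih.2
    · have h1 : leadRun c (d :: t') = 0 := by simp [leadRun, hd]
      rw [h1]
      simpa using hd

theorem fold_rep (length : Int) (ch : Char) :
    ∀ (m : Nat) (c r : Int),
      (List.replicate m ch).foldl (homopolyStep length) (c, r, some ch) = (c, r + (m : Int), some ch) := by
  intro m
  induction m with
  | zero => intro c r; simp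
  | succ m ih =>
    intro c r
    rw [List.replicate_succ, List.foldl_cons]
    have hstep : homopolyStep length (c, r, some ch) ch = (c, r + 1, some ch) := by
      simp [homopolyStep]
    rw [hstep, ih]
    have : r + 1 + (m : Int) = r + ((m : Nat) + 1 : Nat) := by push_cast; ring
    rw [this]

-- B's loop on a list whose head ends the previous run: flush the run, then count windows run by run
theorem BM (length : Int) (h1 : 1 ≤ length) :
    ∀ (n : Nat) (l : List Char), l.length ≤ n → ∀ (cnt run : Int) (pv : Option Char),
      l.head? ≠ pv →
      (let st := l.foldl (homopolyStep length) (cnt, run, pv)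
       if length ≤ st.2.1 then st.1 + st.2.1 - length + 1 else st.1)
        = cnt + contrib length run + (winCount length.toNat l : Int) := by
  intro n
  induction n with
  | zero =>
    intro l hl cnt run pv hpv
    have : l = [] := List.eq_nil_of_length_eq_zero (by omega)
    subst this
    simp only [List.foldl_nil]
    rw [flush_eq, winCount_nil_of_lt length.toNat [] (by simp; omega)]
    simp
  | succ n ih =>
    intro l hl cnt run pv hpv
    cases l with
    | nil =>
      simp only [List.foldl_nil]
      rw [flush_eq, winCount_nil_of_lt length.toNat [] (by simp; omega)]
      simp
    | cons d t =>
      have hstep : homopolyStep length (cnt, run, pv) d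
          = (if length ≤ run then cnt + run - length + 1 else cnt, 1, some d) := by
        have : ¬ (some d = pv) := fun h => hpv (by simp [h])
        simp [homopolyStep, this]
      simp only [List.foldl_cons, hstep, flush_eq]
      obtain ⟨hdec, hhd⟩ := leadRun_decomp d t
      set k := leadRun d t with hk
      set t' := t.drop k with ht'
      have hfold : t.foldl (homopolyStep length) (cnt + contrib length run, 1, some d)
          = t'.foldl (homopolyStep length) (cnt + contrib length run, 1 + (k : Int), some d) := by
        conv_lhs => rw [hdec]
        rw [List.foldl_append, fold_rep]
      rw [hfold]
      have hlen' : t'.length ≤ n := by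
        have h2 : t'.length ≤ t.length := by rw [ht', List.length_drop]; omega
        simp at hl; omega
      have hih := ih t' hlen' (cnt + contrib length run) (1 + (k : Int)) (some d) hhd
      simp only at hih
      rw [flush_eq] at hih
      rw [hih]
      have hwc : winCount length.toNat (d :: t) = (k + 1 + 1 - length.toNat) + winCount length.toNat t' := by
        have : d :: t = List.replicate (k + 1) d ++ t' := by
          rw [List.replicate_succ, List.cons_append]
          exact congrArg (d :: ·) hdec
        rw [this]
        exact winCount_rep length.toNat (by omega) d (k + 1) t' hhd
      rw [hwc]
      have hcontrib : contrib length (1 + (k : Int)) = ((k + 1 + 1 - length.toNat : Nat) : Int) := by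
        unfold contrib; split_ifs <;> omega
      push_cast
      rw [hcontrib]
      push_cast
      ring

theorem B_eq_winCount (seq : String) (length : Int) (h : 1 ≤ length) :
    count_homopolymer_alt seq length = (winCount length.toNat seq.toList : Int) := by
  unfold count_homopolymer_alt
  rw [if_neg (by omega)]
  cases hl : seq.toList with
  | nil =>
    simp only [List.foldl_nil]
    rw [winCount_nil_of_lt length.toNat [] (by simp; omega)]
    simp
    omega
  | cons d t =>
    have hbm := BM length h (d :: t).length (d :: t) le_rfl 0 0 none (by simp)
    simp only at hbm
    rw [hbm]
    have : contrib length 0 = 0 := by unfold contrib; split_ifs <;> omega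
    rw [this]
    ring

theorem A_zero (seq : String) : count_homopolymer seq 0 = 0 := by
  rw [A_char]
  have : ∀ i ∈ PySem.List.pyRange 0 (PySem.Str.len seq - 0 + 1) 1,
      ¬ (decide (PySem.Set.len (PySem.Set.ofList
        (PySem.Str.slice seq (some i) (some (i + 0))).toList) = 1) = true) := by
    intro i hi
    have hi0 : 0 ≤ i := (PySem.List.mem_pyRange_one.1 hi).1
    have hsl : PySem.List.slice seq.toList (some i) (some (i + 0)) = [] := by
      apply slice_out seq.toList i 0 hi0 le_rfl
      omega
    rw [decide_eq_true_eq, strslice_toList, hsl, setlen_one_iff]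
    simp [allSameB]
  rw [List.countP_eq_zero.2 this]
  rfl

theorem A_neg_zero (seq : String) (length : Int) (hneg : length < 0)
    (hD : ¬ D_count_homopolymer seq length) : count_homopolymer seq length = 0 := by
  rw [A_char]
  have hany : (List.range (min (-length).toNat seq.toList.length)).any
      (fun i => allSameB ((seq.toList.drop i).take ((seq.toList.length : Int) + length).toNat)) = false := by
    cases hb : (List.range (min (-length).toNat seq.toList.length)).any
        (fun i => allSameB ((seq.toList.drop i).take ((seq.toList.length : Int) + length).toNat)) with
    | false => rfl
    | true => exact absurd ⟨hneg, hb⟩ hD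
  rw [List.any_eq_false] at hany
  have : ∀ i ∈ PySem.List.pyRange 0 (PySem.Str.len seq - length + 1) 1,
      ¬ (decide (PySem.Set.len (PySem.Set.ofList
        (PySem.Str.slice seq (some i) (some (i + length))).toList) = 1) = true) := by
    intro i hi
    have hi0 : 0 ≤ i := (PySem.List.mem_pyRange_one.1 hi).1
    rw [decide_eq_true_eq, strslice_toList, setlen_one_iff]
    by_cases hin : i < min (-length) (seq.toList.length : Int)
    · rw [slice_in seq.toList i length hi0 hneg hin]
      have hmem : i.toNat ∈ List.range (min (-length).toNat seq.toList.length) := by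
        rw [List.mem_range]; omega
      have := hany i.toNat hmem
      simpa using this
    · rw [slice_out seq.toList i length hi0 (le_of_lt hneg) hin]
      simp [allSameB]
  rw [List.countP_eq_zero.2 this]
  rfl

theorem B_nonpos (seq : String) (length : Int) (h : length ≤ 0) :
    count_homopolymer_alt seq length = 0 := by
  unfold count_homopolymer_alt
  simp [h]

theorem A_pos_of_D (seq : String) (length : Int) (hD : D_count_homopolymer seq length) :
    0 < count_homopolymer seq length := by
  obtain ⟨hneg, hany⟩ := hD
  rw [List.any_eq_true] at hany
  obtain ⟨i0, hi0mem, hi0⟩ := hany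
  rw [List.mem_range] at hi0mem
  rw [A_char]
  have hpos : 0 < (PySem.List.pyRange 0 (PySem.Str.len seq - length + 1) 1).countP
      (fun i => decide (PySem.Set.len (PySem.Set.ofList
        (PySem.Str.slice seq (some i) (some (i + length))).toList) = 1)) := by
    rw [List.countP_pos_iff]
    refine ⟨(i0 : Int), ?_, ?_⟩
    · rw [PySem.List.mem_pyRange_one, PySem.Str.len_eq]
      exact ⟨by omega, by omega⟩
    · rw [decide_eq_true_eq, strslice_toList, setlen_one_iff]
      rw [slice_in seq.toList (i0 : Int) length (by omega) hneg (by omega)]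
      simpa using hi0
  omega

-- ===== VERDICT (by name: the statement is the Claim_ definition above) =====
theorem count_homopolymer_spec : Claim_unchanged_count_homopolymer := by
  intro seq length _ hD
  rcases lt_trichotomy length 0 with hlt | heq | hgt
  · rw [A_neg_zero seq length hlt hD, B_nonpos seq length (le_of_lt hlt)]
  · subst heq; rw [A_zero, B_nonpos seq 0 le_rfl]
  · rw [A_eq_winCount seq length hgt, B_eq_winCount seq length hgt]

theorem count_homopolymer_changed : Claim_changed_count_homopolymer := by
  unfold Claim_changed_count_homopolymer; decide

theorem count_homopolymer_tight : Claim_exact_count_homopolymer := by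
  intro seq length _ hD
  have hA := A_pos_of_D seq length hD
  rw [B_nonpos seq length (le_of_lt hD.1)]
  omega
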